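-- pv_equiv track=rewrite | github.com/solbus/whatch | app/ui/library_menu.py | _title_sort_key
-- ===== SOURCE A (Python) =====
-- def _title_sort_key(value):
--     if not value:
--         return ""
--     text = value.strip()
--     lowered = text.lower()
--     for prefix in ("the ", "el ", "la "):
--         if lowered.startswith(prefix):
--             return lowered[len(prefix):]
--     return lowered
-- ===== SOURCE B (Python) =====
-- def _title_sort_key(value):
--     if not value:
--         return ""
--     lowered = value.strip().lower()
--     parts = lowered.split(" ", 1)
--     if len(parts) == 2 and parts[0] in {"the", "el", "la"}:
--         return parts[1]
--     return lowered
-- ===== Notes on version B (the rewrite author's own statement) =====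
-- stated objective: simpler
-- what changed: Instead of looping over the three articled prefixes with startswith and slicing, B splits the lowered string once at the first space (maxsplit=1) and tests the first word against a set of articles, returning the remainder piece.
import Mathlib
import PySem

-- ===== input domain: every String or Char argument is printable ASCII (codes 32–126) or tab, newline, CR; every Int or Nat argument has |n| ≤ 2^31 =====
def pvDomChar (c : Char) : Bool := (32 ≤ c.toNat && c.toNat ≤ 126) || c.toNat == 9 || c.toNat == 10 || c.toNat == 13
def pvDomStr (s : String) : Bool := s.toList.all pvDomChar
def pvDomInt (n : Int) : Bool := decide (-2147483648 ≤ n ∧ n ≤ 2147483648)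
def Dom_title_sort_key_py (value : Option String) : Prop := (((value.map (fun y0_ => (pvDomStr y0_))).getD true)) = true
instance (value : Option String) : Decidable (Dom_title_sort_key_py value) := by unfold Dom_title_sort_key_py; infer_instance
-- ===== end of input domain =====

-- B replaces A's loop over article prefixes (startswith + slicing) by one split(" ", 1)
-- and a set-membership test on the first word; objective: simpler.

-- ===== PORT A =====
def title_sort_key_py (value : Option String) : String :=
  match value with
  | none => ""
  | some v =>
    if v = "" then ""
    else
      let text := PySem.Str.strip v
      let lowered := PySem.Str.lower text
      -- for prefix in ("the ", "el ", "la "): if lowered.startswith(prefix): return lowered[len(prefix):]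
      if PySem.Str.startswith lowered "the " then PySem.Str.slice lowered (some 4) none
      else if PySem.Str.startswith lowered "el " then PySem.Str.slice lowered (some 3) none
      else if PySem.Str.startswith lowered "la " then PySem.Str.slice lowered (some 3) none
      else lowered

-- ===== PORT B =====
def title_sort_key_py_alt (value : Option String) : String :=
  match value with
  | none => ""
  | some v =>
    if v = "" then ""
    else
      let lowered := PySem.Str.lower (PySem.Str.strip v)
      match PySem.Str.splitMax? lowered " " 1 with
      | some [head, rest] =>
          if head = "the" ∨ head = "el" ∨ head = "la" then rest else lowered
      | _ => lowered

-- ===== PRECONDITION & SPEC =====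
def Spec_title_sort_key_py (value : Option String) (out : String) : Prop := out = title_sort_key_py_alt value
instance (value : Option String) (out : String) : Decidable (Spec_title_sort_key_py value out) := by unfold Spec_title_sort_key_py; infer_instance

-- ===== CLAIM (what is proved, stated in full; the proofs are below) =====
def Claim_equal_title_sort_key_py : Prop := ∀ (value : Option String), Dom_title_sort_key_py value → Spec_title_sort_key_py value (title_sort_key_py value)

-- ===== LEMMAS AND PROOFS =====

-- splitOnMax.go with maxsplit exhausted returns the rest as one final piece.
lemma go_zero (fuel : Nat) (l cur : List Char) (acc : List (List Char)) :
    PySem.Chars.splitOnMax.go [' '] fuel 0 l cur acc = ((cur.reverse ++ l) :: acc).reverse := by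
  cases fuel with
  | zero => rfl
  | succ f => cases l with
    | nil => simp [PySem.Chars.splitOnMax.go]
    | cons c rest => simp [PySem.Chars.splitOnMax.go]

-- splitOnMax.go with maxsplit = 1 splits at the first space, if any.
lemma go_one (l : List Char) : ∀ (fuel : Nat) (cur : List Char) (acc : List (List Char)), l.length < fuel →
    PySem.Chars.splitOnMax.go [' '] fuel 1 l cur acc =
      if ' ' ∈ l then
        acc.reverse ++ [cur.reverse ++ l.takeWhile (· ≠ ' '), (l.dropWhile (· ≠ ' ')).tail]
      else acc.reverse ++ [cur.reverse ++ l] := by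
  induction l with
  | nil =>
    intro fuel cur acc h
    cases fuel with
    | zero => omega
    | succ f => simp [PySem.Chars.splitOnMax.go]
  | cons c rest ih =>
    intro fuel cur acc h
    cases fuel with
    | zero => omega
    | succ f =>
      by_cases hc : c = ' '
      · subst hc
        have hstep : PySem.Chars.splitOnMax.go [' '] (f+1) 1 (' ' :: rest) cur acc =
            PySem.Chars.splitOnMax.go [' '] f 0 rest [] (cur.reverse :: acc) := by
          simp [PySem.Chars.splitOnMax.go, List.isPrefixOf]
        rw [hstep, go_zero]
        simp [List.takeWhile, List.dropWhile]
      · have hstep : PySem.Chars.splitOnMax.go [' '] (f+1) 1 (c :: rest) cur acc =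
            PySem.Chars.splitOnMax.go [' '] f 1 rest (c :: cur) acc := by
          simp [PySem.Chars.splitOnMax.go, List.isPrefixOf]
          intro h'
          exact absurd h'.symm hc
        rw [hstep, ih f (c :: cur) acc (by simpa using h)]
        simp [List.takeWhile, List.dropWhile, hc, Ne.symm hc]

-- lowered.split(" ", 1): one piece if there is no space, else first word and the raw remainder.
lemma splitOnMax_one (cs : List Char) :
    PySem.Chars.splitOnMax cs [' '] 1 =
      if ' ' ∈ cs then [cs.takeWhile (· ≠ ' '), (cs.dropWhile (· ≠ ' ')).tail]
      else [cs] := by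
  have h0 : PySem.Chars.splitOnMax cs [' '] 1 =
      PySem.Chars.splitOnMax.go [' '] (cs.length + 1) 1 cs [] [] := by
    simp [PySem.Chars.splitOnMax]
  rw [h0, go_one cs (cs.length + 1) [] [] (by omega)]
  split <;> simp

-- if a space occurs, the string is first-word ++ ' ' :: tail-of-remainder
lemma split_shape (cs : List Char) (h : ' ' ∈ cs) :
    cs = cs.takeWhile (· ≠ ' ') ++ ' ' :: (cs.dropWhile (· ≠ ' ')).tail := by
  have hne : cs.dropWhile (· ≠ ' ') ≠ [] := by
    simp only [ne_eq, List.dropWhile_eq_nil_iff]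
    intro hall
    exact absurd (hall ' ' h) (by simp)
  have hhead : (cs.dropWhile (· ≠ ' ')).head hne = ' ' := by
    have := List.head_dropWhile_not (fun c => decide (c ≠ ' ')) hne
    simpa using this
  conv_lhs => rw [← List.takeWhile_append_dropWhile (p := fun c => decide (c ≠ ' ')) (l := cs),
    ← List.cons_head_tail hne, hhead]

-- Core equality, for an arbitrary lowered string.
lemma key_str (s : String) :
    (if PySem.Str.startswith s "the " then PySem.Str.slice s (some 4) none
     else if PySem.Str.startswith s "el " then PySem.Str.slice s (some 3) none
     else if PySem.Str.startswith s "la " then PySem.Str.slice s (some 3) none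
     else s)
    = (match PySem.Str.splitMax? s " " 1 with
       | some [head, rest] =>
           if head = "the" ∨ head = "el" ∨ head = "la" then rest else s
       | _ => s) := by
  have hsplit : PySem.Str.splitMax? s " " 1 =
      some ((PySem.Chars.splitOnMax s.toList [' '] 1).map String.ofList) := by
    simp [PySem.Str.splitMax?, PySem.Chars.splitMax?]
  rw [hsplit, splitOnMax_one]
  by_cases h1 : PySem.Str.startswith s "the "
  · have h1c : PySem.Chars.startswith s.toList ['t','h','e',' '] = true := h1
    obtain ⟨rest, hrest⟩ := (PySem.Chars.startswith_iff _ _).mp h1c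
    have hmem : ' ' ∈ s.toList := by rw [← hrest]; simp
    have htake : s.toList.takeWhile (fun x => !decide (x = ' ')) = ['t','h','e'] := by
      rw [← hrest]; rfl
    have htail : (s.toList.dropWhile (fun x => !decide (x = ' '))).tail = rest := by
      rw [← hrest]; rfl
    have hslice : PySem.Str.slice s (some 4) none = String.ofList rest := by
      unfold PySem.Str.slice
      rw [PySem.Chars.slice_eq_listSlice, PySem.List.slice_from _ (by norm_num : (0:Int) ≤ 4),
        ← hrest]
      rfl
    have hthe : String.ofList ['t','h','e'] = "the" := rfl
    simp [h1c, hmem, htake, htail, hslice, hthe]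
  · have h1c : ¬ (PySem.Chars.startswith s.toList ['t','h','e',' '] = true) := h1
    by_cases h2 : PySem.Str.startswith s "el "
    · have h2c : PySem.Chars.startswith s.toList ['e','l',' '] = true := h2
      obtain ⟨rest, hrest⟩ := (PySem.Chars.startswith_iff _ _).mp h2c
      have hmem : ' ' ∈ s.toList := by rw [← hrest]; simp
      have htake : s.toList.takeWhile (fun x => !decide (x = ' ')) = ['e','l'] := by
        rw [← hrest]; rfl
      have htail : (s.toList.dropWhile (fun x => !decide (x = ' '))).tail = rest := by
        rw [← hrest]; rfl
      have hslice : PySem.Str.slice s (some 3) none = String.ofList rest := by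
        unfold PySem.Str.slice
        rw [PySem.Chars.slice_eq_listSlice, PySem.List.slice_from _ (by norm_num : (0:Int) ≤ 3),
          ← hrest]
        rfl
      have hel : String.ofList ['e','l'] = "el" := rfl
      simp [h1c, h2c, hmem, htake, htail, hslice, hel]
    · have h2c : ¬ (PySem.Chars.startswith s.toList ['e','l',' '] = true) := h2
      by_cases h3 : PySem.Str.startswith s "la "
      · have h3c : PySem.Chars.startswith s.toList ['l','a',' '] = true := h3
        obtain ⟨rest, hrest⟩ := (PySem.Chars.startswith_iff _ _).mp h3c
        have hmem : ' ' ∈ s.toList := by rw [← hrest]; simp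
        have htake : s.toList.takeWhile (fun x => !decide (x = ' ')) = ['l','a'] := by
          rw [← hrest]; rfl
        have htail : (s.toList.dropWhile (fun x => !decide (x = ' '))).tail = rest := by
          rw [← hrest]; rfl
        have hslice : PySem.Str.slice s (some 3) none = String.ofList rest := by
          unfold PySem.Str.slice
          rw [PySem.Chars.slice_eq_listSlice, PySem.List.slice_from _ (by norm_num : (0:Int) ≤ 3),
            ← hrest]
          rfl
        have hla : String.ofList ['l','a'] = "la" := rfl
        simp [h1c, h2c, h3c, hmem, htake, htail, hslice, hla]
      · have h3c : ¬ (PySem.Chars.startswith s.toList ['l','a',' '] = true) := h3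
        by_cases hsp : ' ' ∈ s.toList
        · have hw : ∀ pat : List Char,
              ¬ (PySem.Chars.startswith s.toList (pat ++ [' ']) = true) →
              String.ofList (s.toList.takeWhile (fun x => !decide (x = ' '))) = String.ofList pat →
              False := by
            intro pat hsw heq
            have hl := congrArg String.toList heq
            simp only [String.toList_ofList] at hl
            apply hsw
            rw [PySem.Chars.startswith_iff]
            refine ⟨(s.toList.dropWhile (fun x => !decide (x = ' '))).tail, ?_⟩
            conv_rhs => rw [split_shape s.toList hsp]
            have hpred : (fun x => !decide (x = ' ')) = (fun c : Char => decide (c ≠ ' ')) := by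
              funext c; simp
            rw [← hpred, hl]
            simp
          have h1' : String.ofList (s.toList.takeWhile (fun x => !decide (x = ' '))) ≠ "the" :=
            fun heq => hw ['t','h','e'] h1c heq
          have h2' : String.ofList (s.toList.takeWhile (fun x => !decide (x = ' '))) ≠ "el" :=
            fun heq => hw ['e','l'] h2c heq
          have h3' : String.ofList (s.toList.takeWhile (fun x => !decide (x = ' '))) ≠ "la" :=
            fun heq => hw ['l','a'] h3c heq
          simp [h1c, h2c, h3c, hsp, h1', h2', h3']
        · simp [h1c, h2c, h3c, hsp]

-- ===== VERDICT (by name: the statement is the Claim_ definition above) =====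
theorem title_sort_key_py_spec : Claim_equal_title_sort_key_py := by
  intro value _
  unfold Spec_title_sort_key_py title_sort_key_py title_sort_key_py_alt
  match value with
  | none => rfl
  | some v =>
    by_cases hv : v = ""
    · simp [hv]
    · simp only [hv, if_false]
      exact key_str (PySem.Str.lower (PySem.Str.strip v))
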